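-- pv_equiv track=rewrite | github.com/dirtysalt/codes | py/misc/reduce_blanks.py | reduce_blanks
-- ===== SOURCE A (Python) =====
-- def flush_buffers(output, buffers):
--     if not buffers: return
--     min_indent = min([x.find('-') for x in buffers])
--     for x in buffers:
--         indent = x.find('-')
--         output.append(' ' * (indent - min_indent) + x[indent:])
--     buffers.clear()
--
-- def reduce_blanks(lines):
--     output = []
--     buffers = []
--     for x in lines:
--         y = x
--         if x.strip().startswith('-'):
--             buffers.append(x)
--         else:
--             flush_buffers(output, buffers)
--             output.append(y)
--     flush_buffers(output, buffers)
--     return output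
-- ===== SOURCE B (Python) =====
-- def reduce_blanks(lines):
--     def dash(s):
--         return s.strip().startswith('-')
--     out = []
--     i, n = 0, len(lines)
--     while i < n:
--         j = i + 1
--         while j < n and dash(lines[j]) == dash(lines[i]):
--             j += 1
--         run = lines[i:j]
--         if dash(lines[i]):
--             m = min(s.find('-') for s in run)
--             out.extend(' ' * (s.find('-') - m) + s[s.find('-'):] for s in run)
--         else:
--             out.extend(run)
--         i = j
--     return out
-- ===== Notes on version B (the rewrite author's own statement) =====
-- stated objective: alternative
-- what changed: Replaces A's mutable buffer-and-flush accumulation with groupby-style run segmentation: two index pointers delimit each maximal run of same-kind lines, dash runs are normalized as a whole slice, non-dash runs are copied through.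
import Mathlib
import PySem

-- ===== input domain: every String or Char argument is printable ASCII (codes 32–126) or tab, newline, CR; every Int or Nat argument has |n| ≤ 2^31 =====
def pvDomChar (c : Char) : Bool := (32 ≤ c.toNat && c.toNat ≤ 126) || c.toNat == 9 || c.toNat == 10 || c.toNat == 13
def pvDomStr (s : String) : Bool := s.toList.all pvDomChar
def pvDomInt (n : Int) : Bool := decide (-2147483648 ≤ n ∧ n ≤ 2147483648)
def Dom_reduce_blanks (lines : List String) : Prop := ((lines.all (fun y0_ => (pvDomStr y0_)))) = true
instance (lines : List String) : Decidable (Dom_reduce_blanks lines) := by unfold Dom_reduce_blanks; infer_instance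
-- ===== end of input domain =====

-- B replaces A's mutable buffer-and-flush accumulation with groupby-style run
-- segmentation (maximal runs of same-kind lines processed as a whole); same cost,
-- alternative decomposition. Return values proved equal on all inputs.

-- ===== PORT A =====
-- x.strip().startswith('-')
def pvDash (x : String) : Bool := PySem.Str.startswith (PySem.Str.strip x) "-"

-- flush_buffers: min of finds, then ' '*(indent-min) + x[indent:] for each buffered line
def pvFlushA (buffers : List String) : List String :=
  if buffers = [] then []
  else
    match PySem.List.min? (buffers.map (fun x => PySem.Str.find x "-")) (fun v => v) with
    | none => []    -- unreachable: buffers ≠ []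
    | some minIndent =>
        buffers.map (fun x =>
          let indent := PySem.Str.find x "-"
          String.ofList (List.replicate (indent - minIndent).toNat ' ' ++
            PySem.Chars.slice x.toList (some indent) none))

-- the for-loop of reduce_blanks, state = (output, buffers); final flush at the end
def pvLoopA (lines output buffers : List String) : List String :=
  match lines with
  | [] => output ++ pvFlushA buffers
  | x :: xs =>
      if pvDash x then pvLoopA xs output (buffers ++ [x])
      else pvLoopA xs (output ++ pvFlushA buffers ++ [x]) []

def reduce_blanks (lines : List String) : List String := pvLoopA lines [] []

-- ===== PORT B =====
-- normalize one maximal dash run: m = min of finds, then re-indent each line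
def pvNormB (run : List String) : List String :=
  match PySem.List.min? (run.map (fun s => PySem.Str.find s "-")) (fun v => v) with
  | none => []    -- unreachable: runs are nonempty
  | some m =>
      run.map (fun s =>
        String.ofList (List.replicate (PySem.Str.find s "-" - m).toNat ' ' ++
          PySem.Chars.slice s.toList (some (PySem.Str.find s "-")) none))

-- the outer while-loop: split off the maximal run of lines with the head's kind,
-- emit it (normalized if a dash run), continue at its end
def reduce_blanks_alt (lines : List String) : List String :=
  match lines with
  | [] => []
  | x :: xs =>
      let k := pvDash x
      (if k then pvNormB (x :: xs.takeWhile (fun y => pvDash y == k))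
       else x :: xs.takeWhile (fun y => pvDash y == k)) ++
      reduce_blanks_alt (xs.dropWhile (fun y => pvDash y == k))
termination_by lines.length
decreasing_by
  exact Nat.lt_succ_of_le (List.length_dropWhile_le _ _)

-- ===== PRECONDITION & SPEC =====
def Spec_reduce_blanks (lines : List String) (out : List String) : Prop := out = reduce_blanks_alt lines
instance (lines : List String) (out : List String) : Decidable (Spec_reduce_blanks lines out) := by unfold Spec_reduce_blanks; infer_instance

-- ===== CLAIM (what is proved, stated in full; the proofs are below) =====
def Claim_equal_reduce_blanks : Prop := ∀ (lines : List String), Dom_reduce_blanks lines → Spec_reduce_blanks lines (reduce_blanks lines)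

-- ===== LEMMAS AND PROOFS =====

-- one-step unfolding lemmas for the two loops
theorem pvLoopA_nil (out buf : List String) : pvLoopA [] out buf = out ++ pvFlushA buf := rfl

theorem pvLoopA_cons (x : String) (xs out buf : List String) :
    pvLoopA (x :: xs) out buf =
      if pvDash x then pvLoopA xs out (buf ++ [x])
      else pvLoopA xs (out ++ pvFlushA buf ++ [x]) [] := rfl

theorem alt_nil : reduce_blanks_alt [] = [] := by
  rw [reduce_blanks_alt.eq_def]

theorem alt_cons (x : String) (xs : List String) :
    reduce_blanks_alt (x :: xs) =
      (if pvDash x then pvNormB (x :: xs.takeWhile (fun y => pvDash y == pvDash x))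
       else x :: xs.takeWhile (fun y => pvDash y == pvDash x)) ++
      reduce_blanks_alt (xs.dropWhile (fun y => pvDash y == pvDash x)) := by
  rw [reduce_blanks_alt.eq_def]

-- A's flush and B's normalizer compute the same lines (both are empty on [])
theorem pvFlushA_eq_pvNormB (l : List String) : pvFlushA l = pvNormB l := by
  cases l with
  | nil => simp [pvFlushA, pvNormB, PySem.List.min?]
  | cons a t => simp [pvFlushA, pvNormB]

-- the loop's output accumulator only ever grows on the left
theorem pvLoopA_out (lines : List String) : ∀ out buf : List String,
    pvLoopA lines out buf = out ++ pvLoopA lines [] buf := by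
  induction lines with
  | nil => intro out buf; simp [pvLoopA_nil]
  | cons x xs ih =>
      intro out buf
      rw [pvLoopA_cons, pvLoopA_cons]
      by_cases h : pvDash x
      · simp only [h, if_true]
        exact ih out (buf ++ [x])
      · simp only [h]
        rw [ih (out ++ pvFlushA buf ++ [x]) [], ih ([] ++ pvFlushA buf ++ [x]) []]
        simp

-- head-run characterization: running A's loop with pending buffers equals flushing
-- the buffers together with the leading dash run, then B on the remainder
theorem pvLoopA_run (lines : List String) : ∀ buf : List String,
    pvLoopA lines [] buf =
      pvFlushA (buf ++ lines.takeWhile pvDash) ++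
        reduce_blanks_alt (lines.dropWhile pvDash) := by
  induction lines with
  | nil => intro buf; simp [pvLoopA_nil, alt_nil]
  | cons x xs ih =>
      intro buf
      rw [pvLoopA_cons]
      by_cases h : pvDash x
      · rw [if_pos h, List.takeWhile_cons_of_pos h, List.dropWhile_cons_of_pos h, ih (buf ++ [x])]
        simp
      · have hx : pvDash x = false := by simpa using h
        rw [if_neg h, List.takeWhile_cons_of_neg (by simp [hx]),
          List.dropWhile_cons_of_neg (by simp [hx]),
          pvLoopA_out, ih []]
        have halt : reduce_blanks_alt (x :: xs) =
            x :: (pvFlushA (xs.takeWhile pvDash) ++ reduce_blanks_alt (xs.dropWhile pvDash)) := by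
          rw [alt_cons, if_neg (by simp [hx])]
          cases xs with
          | nil => simp [alt_nil, pvFlushA, pvNormB]
          | cons y ys =>
              by_cases hy : pvDash y
              · rw [List.takeWhile_cons_of_neg (by simp [hx, hy]),
                  List.dropWhile_cons_of_neg (by simp [hx, hy]),
                  List.takeWhile_cons_of_pos hy, List.dropWhile_cons_of_pos hy,
                  alt_cons, if_pos hy, pvFlushA_eq_pvNormB]
                simp [hy, beq_true]
              · have hy' : pvDash y = false := by simpa using hy
                rw [List.takeWhile_cons_of_pos (by simp [hx, hy']),
                  List.dropWhile_cons_of_pos (by simp [hx, hy']),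
                  List.takeWhile_cons_of_neg (by simp [hy']),
                  List.dropWhile_cons_of_neg (by simp [hy']),
                  alt_cons, if_neg (by simp [hy'])]
                simp [hx, hy', pvFlushA]
        rw [halt]
        simp [pvFlushA]

-- ===== VERDICT (by name: the statement is the Claim_ definition above) =====
theorem reduce_blanks_spec : Claim_equal_reduce_blanks := by
  intro lines _
  unfold Spec_reduce_blanks reduce_blanks
  rw [pvLoopA_run lines []]
  cases lines with
  | nil => simp [alt_nil, pvFlushA]
  | cons x xs =>
      by_cases h : pvDash x
      · rw [List.takeWhile_cons_of_pos h, List.dropWhile_cons_of_pos h,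
          alt_cons, if_pos h, pvFlushA_eq_pvNormB]
        simp [h, beq_true]
      · have hx : pvDash x = false := by simpa using h
        rw [List.takeWhile_cons_of_neg (by simp [hx]),
          List.dropWhile_cons_of_neg (by simp [hx])]
        simp [pvFlushA]
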